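-- pv_equiv track=rewrite | github.com/Notome/PI | labsmalshakovdo13.py | lab_10_3_6
-- ===== SOURCE A (Python) =====
-- def lab_10_3_6(matrix):
--     min_element = min(matrix[i][i] for i in range(len(matrix)))
--     min_index = [i for i in range(len(matrix)) if matrix[i][i] == min_element][0]
--
--     new_matrix = []
--     for i in range(len(matrix)):
--         if i != min_index:
--             new_row = []
--             for j in range(len(matrix)):
--                 if j != min_index:
--                     new_row.append(matrix[i][j])
--             new_matrix.append(new_row)
--
--     return new_matrix
--
-- j = 9
-- ===== SOURCE B (Python) =====
-- def lab_10_3_6(matrix):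
--     k = min(range(len(matrix)), key=lambda i: matrix[i][i])
--     result = [list(row) for row in matrix]
--     del result[k]
--     for row in result:
--         del row[k]
--     return result
-- ===== Notes on version B (the rewrite author's own statement) =====
-- stated objective: simpler
-- what changed: B locates the first minimal diagonal index with a single argmin over indices and builds the result by copying the matrix and deleting the k-th row and the k-th entry of each row, instead of A's separate min-value pass, index-filter pass and nested per-element index-filtering append loops; the C-level list copy/delete also makes it measurably faster by a constant factor.
-- outside the precondition, e.g. on lab_10_3_6([[1, 2, 3], [4, 5, 6]]): A returns [[5]], B returns [[5, 6]]
import Mathlib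
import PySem

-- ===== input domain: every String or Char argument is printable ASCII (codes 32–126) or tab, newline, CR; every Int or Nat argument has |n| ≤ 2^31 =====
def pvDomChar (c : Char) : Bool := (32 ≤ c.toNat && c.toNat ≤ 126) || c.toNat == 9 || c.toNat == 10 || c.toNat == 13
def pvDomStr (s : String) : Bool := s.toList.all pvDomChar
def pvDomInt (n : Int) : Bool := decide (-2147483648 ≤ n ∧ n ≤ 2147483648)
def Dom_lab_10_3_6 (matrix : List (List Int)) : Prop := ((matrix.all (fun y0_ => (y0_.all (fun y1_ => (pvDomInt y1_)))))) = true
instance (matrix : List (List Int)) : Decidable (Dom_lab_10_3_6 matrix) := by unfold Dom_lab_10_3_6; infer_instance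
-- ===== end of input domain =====

-- B finds the first minimal diagonal index in one argmin pass and deletes the k-th row and column,
-- replacing A's min-value pass + index-filter pass + nested index-filtering loops (simpler decomposition).


-- ===== PORT A =====
def lab_10_3_6 (matrix : List (List Int)) : List (List Int) :=
  let n : Int := matrix.length
  let min_element : Int :=
    (PySem.List.min? ((PySem.List.pyRange 0 n 1).map
      (fun i => PySem.List.pyGetD (PySem.List.pyGetD matrix i []) i 0)) (fun x => x)).getD 0
  let min_index : Int :=
    PySem.List.pyGetD ((PySem.List.pyRange 0 n 1).filter
      (fun i => PySem.List.pyGetD (PySem.List.pyGetD matrix i []) i 0 == min_element)) 0 0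
  (PySem.List.pyRange 0 n 1).foldl (fun new_matrix i =>
    if i ≠ min_index then
      new_matrix ++ [ (PySem.List.pyRange 0 n 1).foldl (fun new_row j =>
        if j ≠ min_index then new_row ++ [PySem.List.pyGetD (PySem.List.pyGetD matrix i []) j 0]
        else new_row) [] ]
    else new_matrix) []

-- ===== PORT B =====
def lab_10_3_6_alt (matrix : List (List Int)) : List (List Int) :=
  let n : Int := matrix.length
  let k : Int :=
    (PySem.List.min? (PySem.List.pyRange 0 n 1)
      (fun i => PySem.List.pyGetD (PySem.List.pyGetD matrix i []) i 0)).getD 0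
  let result : List (List Int) := matrix.map (fun row => row)
  let result : List (List Int) := ((PySem.List.pop? result k).map (·.2)).getD result
  result.map (fun row => ((PySem.List.pop? row k).map (·.2)).getD row)

-- ===== PRECONDITION & SPEC =====
-- Pre_ excludes the empty matrix (A's min() raises ValueError) and non-square matrices, where
-- A's truncation of every row to len(matrix) columns is an artefact of its range-based loops.
def Pre_lab_10_3_6 (matrix : List (List Int)) : Prop :=
  matrix ≠ [] ∧ ∀ row ∈ matrix, row.length = matrix.length
instance (matrix : List (List Int)) : Decidable (Pre_lab_10_3_6 matrix) := by
  unfold Pre_lab_10_3_6; infer_instance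
def pvWitness_lab_10_3_6 : List (List Int) := [[4, 2], [3, 1]]

def Spec_lab_10_3_6 (matrix : List (List Int)) (out : List (List Int)) : Prop := out = lab_10_3_6_alt matrix
instance (matrix : List (List Int)) (out : List (List Int)) : Decidable (Spec_lab_10_3_6 matrix out) := by unfold Spec_lab_10_3_6; infer_instance

-- ===== CLAIM (what is proved, stated in full; the proofs are below) =====
def Claim_equal_lab_10_3_6 : Prop := ∀ (matrix : List (List Int)), Dom_lab_10_3_6 matrix → Pre_lab_10_3_6 matrix → Spec_lab_10_3_6 matrix (lab_10_3_6 matrix)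

-- ===== LEMMAS AND PROOFS =====

theorem pvFold_some {α : Type} (key : α → Int) (t : List α) (a : α) :
    t.foldl (fun acc x => match acc with | none => some x | some m => if key x < key m then some x else some m) (some a)
    = some (t.foldl (fun m x => if key x < key m then x else m) a) := by
  induction t generalizing a with
  | nil => rfl
  | cons x t ih =>
    simp only [List.foldl_cons]
    by_cases h : key x < key a
    · simp only [if_pos h]; exact ih x
    · simp only [if_neg h]; exact ih a

theorem min?_cons_fold {α : Type} (key : α → Int) (x : α) (t : List α) :
    PySem.List.min? (x :: t) key = some (t.foldl (fun m y => if key y < key m then y else m) x) := by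
  simp only [PySem.List.min?, List.foldl_cons]
  exact pvFold_some key t x

theorem pvG_spec {α : Type} (key : α → Int) (xs : List α) (a : α) :
    xs.foldl (fun m x => if key x < key m then x else m) a =
      match PySem.List.min? xs key with
      | none => a
      | some m => if key m < key a then m else a := by
  induction xs generalizing a with
  | nil => rfl
  | cons x t ih =>
    simp only [List.foldl_cons]
    rw [ih, min?_cons_fold, ih x]
    rcases ht : PySem.List.min? t key with _ | m <;> simp only []
    by_cases h1 : key m < key x <;> by_cases h2 : key m < key a <;> by_cases h3 : key x < key a <;>
      simp [h1, h2, h3] <;> (exfalso; omega)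

theorem min?_cons_eq {α : Type} (key : α → Int) (x : α) (t : List α) :
    PySem.List.min? (x :: t) key =
      some (match PySem.List.min? t key with
            | none => x
            | some m => if key m < key x then m else x) := by
  rw [min?_cons_fold, pvG_spec]

theorem min?_map_id {α : Type} (f : α → Int) (xs : List α) :
    PySem.List.min? (xs.map f) (fun x => x) = (PySem.List.min? xs f).map f := by
  induction xs with
  | nil => rfl
  | cons x t ih =>
    rw [List.map_cons, min?_cons_eq, min?_cons_eq, ih]
    rcases ht : PySem.List.min? t f with _ | m
    · rfl
    · simp only [Option.map_some]
      by_cases h : f m < f x <;> simp [h]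

theorem head_filter_of_min? {α : Type} (key : α → Int) (xs : List α) (m : α)
    (h : PySem.List.min? xs key = some m) :
    (xs.filter (fun y => key y == key m)).head? = some m := by
  induction xs generalizing m with
  | nil => simp [PySem.List.min?] at h
  | cons x t ih =>
    rw [min?_cons_eq] at h
    injection h with h
    rcases ht : PySem.List.min? t key with _ | m' <;> rw [ht] at h
    · have hx : x = m := h
      cases t with
      | nil => subst hx; simp
      | cons y t' => rw [min?_cons_eq] at ht; simp at ht
    · have h' : (if key m' < key x then m' else x) = m := h
      by_cases hlt : key m' < key x
      · rw [if_pos hlt] at h'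
        subst h'
        have hne : (key x == key m') = false := by simp; omega
        simp only [List.filter_cons, hne, Bool.false_eq_true, if_false]
        exact ih m' ht
      · rw [if_neg hlt] at h'
        subst h'
        simp

theorem filter_ne_pyRange (n k : Int) (h0 : 0 ≤ k) (hk : k < n) :
    (PySem.List.pyRange 0 n 1).filter (fun i => decide (i ≠ k)) =
      PySem.List.pyRange 0 k 1 ++ PySem.List.pyRange (k + 1) n 1 := by
  rw [PySem.List.pyRange_one_append 0 k n h0 (le_of_lt hk),
      PySem.List.pyRange_one_append k (k+1) n (by omega) (by omega),
      PySem.List.pyRange_one_singleton,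
      List.filter_append, List.filter_append]
  have h1 : (PySem.List.pyRange 0 k 1).filter (fun i => decide (i ≠ k)) = PySem.List.pyRange 0 k 1 := by
    apply List.filter_eq_self.mpr
    intro a ha
    have := PySem.List.mem_pyRange_one.mp ha
    simp only [decide_eq_true_eq]; omega
  have h3 : (PySem.List.pyRange (k+1) n 1).filter (fun i => decide (i ≠ k)) = PySem.List.pyRange (k+1) n 1 := by
    apply List.filter_eq_self.mpr
    intro a ha
    have := PySem.List.mem_pyRange_one.mp ha
    simp only [decide_eq_true_eq]; omega
  rw [h1, h3]
  simp

theorem map_pyGetD_take {α : Type} (xs : List α) (k : Nat) (hk : k ≤ xs.length) (d : α) :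
    (PySem.List.pyRange 0 (k : Int) 1).map (fun i => PySem.List.pyGetD xs i d) = xs.take k := by
  apply List.ext_getElem
  · simp [PySem.List.length_pyRange_one]; omega
  · intro i h1 h2
    rw [List.getElem_map, PySem.List.getElem_pyRange_one, zero_add, PySem.List.pyGetD_natCast,
        List.getD_eq_getElem, List.getElem_take]

theorem map_pyGetD_filter_ne {α : Type} (xs : List α) (k : Nat) (hk : k < xs.length) (d : α) :
    ((PySem.List.pyRange 0 (xs.length : Int) 1).filter (fun i => decide (i ≠ (k : Int)))).map
        (fun i => PySem.List.pyGetD xs i d) = xs.eraseIdx k := by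
  rw [filter_ne_pyRange _ _ (by omega) (by exact_mod_cast hk), List.map_append,
      map_pyGetD_take xs k (le_of_lt hk) d]
  have h2 := PySem.List.map_pyGetD_pyRange xs d (a := (k : Int) + 1) (by omega)
  rw [show PySem.List.len xs = (xs.length : Int) from rfl] at h2
  rw [h2, show ((k : Int) + 1).toNat = k + 1 by omega, ← List.eraseIdx_eq_take_drop_succ]

theorem map_comp_of_map_eq {α β γ : Type} (f : α → β) (g : β → γ) (l : List α) (l' : List β)
    (h : l.map f = l') : l.map (fun x => g (f x)) = l'.map g := by
  rw [← h, List.map_map]; rfl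

-- ===== VERDICT (by name: the statement is the Claim_ definition above) =====
theorem lab_10_3_6_spec : Claim_equal_lab_10_3_6 := by
  intro matrix _ hpre
  obtain ⟨hne, hsq⟩ := hpre
  unfold Spec_lab_10_3_6
  have hlen : 0 < matrix.length := List.length_pos_of_ne_nil hne
  have hr : PySem.List.pyRange 0 (matrix.length : Int) 1
      = 0 :: PySem.List.pyRange 1 (matrix.length : Int) 1 :=
    PySem.List.pyRange_one_cons (by exact_mod_cast hlen)
  obtain ⟨m, hm⟩ : ∃ m, PySem.List.min? (PySem.List.pyRange 0 (matrix.length : Int) 1)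
      (fun i => PySem.List.pyGetD (PySem.List.pyGetD matrix i []) i 0) = some m := by
    rw [hr, min?_cons_eq]; exact ⟨_, rfl⟩
  have hmem := PySem.List.min?_mem hm
  have hb := PySem.List.mem_pyRange_one.mp hmem
  obtain ⟨kn, rfl⟩ : ∃ kn : Nat, ((kn : Nat) : Int) = m := ⟨m.toNat, Int.toNat_of_nonneg hb.1⟩
  have hkn : kn < matrix.length := by exact_mod_cast hb.2
  simp only [lab_10_3_6, lab_10_3_6_alt]
  rw [min?_map_id, hm]
  simp only [Option.map_some, Option.getD_some]
  have hhead := head_filter_of_min? _ _ _ hm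
  obtain ⟨rest, hfil⟩ : ∃ rest,
      (PySem.List.pyRange 0 (matrix.length : Int) 1).filter
        (fun y => PySem.List.pyGetD (PySem.List.pyGetD matrix y []) y 0
          == PySem.List.pyGetD (PySem.List.pyGetD matrix (kn : Int) []) (kn : Int) 0)
        = ((kn : Nat) : Int) :: rest := by
    rcases hfl : (PySem.List.pyRange 0 (matrix.length : Int) 1).filter
        (fun y => PySem.List.pyGetD (PySem.List.pyGetD matrix y []) y 0
          == PySem.List.pyGetD (PySem.List.pyGetD matrix (kn : Int) []) (kn : Int) 0) with _ | ⟨a, l⟩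
    · rw [hfl] at hhead; simp at hhead
    · rw [hfl] at hhead; simp at hhead; exact ⟨l, by rw [hhead]⟩
  simp only [hfil]
  have hget0 : PySem.List.pyGetD (((kn : Nat) : Int) :: rest) 0 0 = ((kn : Nat) : Int) := by
    simp [PySem.List.pyGetD, PySem.List.pyGet?, PySem.List.pyIdx?]
  simp only [hget0, List.map_id']
  rw [PySem.List.pop?_natCast matrix kn hkn]
  simp only [Option.map_some, Option.getD_some]
  -- A side: collapse the two append-folds into filter/maps
  simp only [PySem.List.foldl_append_ite, List.nil_append]
  trans ((matrix.eraseIdx kn).map (fun row =>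
    ((PySem.List.pyRange 0 (matrix.length : Int) 1).filter
      (fun j => decide (j ≠ ((kn : Nat) : Int)))).map (fun j => PySem.List.pyGetD row j 0)))
  · exact map_comp_of_map_eq (fun i => PySem.List.pyGetD matrix i [])
      (fun row => ((PySem.List.pyRange 0 (matrix.length : Int) 1).filter
        (fun j => decide (j ≠ ((kn : Nat) : Int)))).map (fun j => PySem.List.pyGetD row j 0))
      _ _ (map_pyGetD_filter_ne matrix kn hkn [])
  · apply List.map_congr_left
    intro row hrow
    have hrmem : row ∈ matrix := (List.eraseIdx_sublist matrix kn).subset hrow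
    have hrl : row.length = matrix.length := hsq row hrmem
    rw [PySem.List.pop?_natCast row kn (by omega)]
    simp only [Option.map_some, Option.getD_some]
    rw [show (matrix.length : Int) = (row.length : Int) by exact_mod_cast hrl.symm]
    exact map_pyGetD_filter_ne row kn (by omega) 0
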